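-- pv_equiv track=rewrite | github.com/goracle/elliptic-fibration-search | yau.py | decode_vector
-- ===== SOURCE A (Python) =====
-- def decode_vector(vec, labels):
--     """
--     Converts a coefficient vector into a human-readable string representation.
--     """
--     out = []
--     vec_list = vec.list() if hasattr(vec, 'list') else vec
--     for i, lab in enumerate(labels):
--         coeff = int(vec_list[i])
--         if coeff == 0:
--             continue
--
--         if coeff == 1:
--             out.append(lab)
--         elif coeff == -1:
--             out.append(f"-{lab}")
--         else:
--             out.append(f"{coeff}*{lab}")
--
--     if not out:
--         return "0"
--
--     result = out[0]
--     for term in out[1:]: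
--         if term.startswith('-'):
--             result += f" - {term[1:]}"
--         else:
--             result += f" + {term}"
--     return result
-- ===== SOURCE B (Python) =====
-- def decode_vector(vec, labels):
--     """
--     Converts a coefficient vector into a human-readable string representation.
--     Single fused pass: no intermediate term list, sign taken from the coefficient.
--     """
--     result = ""
--     emitted = False
--     for coeff, lab in zip(vec, labels):
--         coeff = int(coeff)
--         if coeff == 0:
--             continue
--         body = lab if abs(coeff) == 1 else f"{abs(coeff)}*{lab}"
--         if emitted:
--             result += (" - " if coeff < 0 else " + ") + body
--         else:
--             result = body if coeff > 0 else "-" + body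
--             emitted = True
--     return result if emitted else "0"
-- ===== Notes on version B (the rewrite author's own statement) =====
-- stated objective: simpler
-- what changed: One fused pass over zip(vec, labels) with a (result, emitted) accumulator, deriving each separator and body from the coefficient's sign and magnitude, instead of building an intermediate term-string list and re-scanning it sniffing each term's leading '-' character.
-- intended difference: On inputs where some non-first emitted term has coefficient exactly 1 and a label that itself starts with '-', A's string sniffing absorbs the label's minus sign and renders e.g. '2*x - y' for label '-y', while B renders the intended '2*x + -y': the label text should be printed verbatim and the separator determined by the coefficient's sign. — e.g. on decode_vector([2, 1], ["x", "-y"]): A returns "2*x - y", B returns "2*x + -y"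
import Mathlib
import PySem

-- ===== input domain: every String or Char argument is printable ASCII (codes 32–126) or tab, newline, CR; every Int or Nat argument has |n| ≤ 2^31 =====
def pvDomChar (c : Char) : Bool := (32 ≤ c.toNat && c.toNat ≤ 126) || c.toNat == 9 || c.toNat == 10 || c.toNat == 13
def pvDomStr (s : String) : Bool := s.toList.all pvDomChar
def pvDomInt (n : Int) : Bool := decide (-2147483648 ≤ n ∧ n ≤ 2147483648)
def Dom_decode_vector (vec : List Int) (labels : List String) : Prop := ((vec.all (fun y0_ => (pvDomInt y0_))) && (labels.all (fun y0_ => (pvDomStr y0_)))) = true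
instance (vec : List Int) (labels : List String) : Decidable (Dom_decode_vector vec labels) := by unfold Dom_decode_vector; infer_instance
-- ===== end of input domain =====

-- B fuses A's two passes (term-list build + re-scan) into one pass over zip(vec, labels),
-- deriving separators from the coefficient's sign instead of sniffing each term string's
-- leading '-'; on labels that themselves start with '-' this fixes A's sign absorption (see D_).


-- ===== PORT A =====
def decode_vector (vec : List Int) (labels : List String) : String :=
  let out : List String := (PySem.List.enumerate labels).foldl (fun (out : List String) p =>
    let coeff := (PySem.List.pyGet? vec p.1).getD 0   -- IndexError = none, excluded by Pre_
    if coeff == 0 then out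
    else if coeff == 1 then out ++ [p.2]
    else if coeff == -1 then out ++ ["-" ++ p.2]
    else out ++ [PySem.Int.toStr coeff ++ "*" ++ p.2]) []
  match out with
  | [] => "0"
  | t :: rest =>
      rest.foldl (fun result term =>
        if PySem.Str.startswith term "-" then result ++ " - " ++ PySem.Str.slice term (some 1) none
        else result ++ " + " ++ term) t

-- ===== PORT B =====
def decode_vector_alt (vec : List Int) (labels : List String) : String :=
  let st : String × Bool := (List.zip vec labels).foldl (fun (st : String × Bool) cl =>
    if cl.1 == 0 then st
    else
      let body := if cl.1.natAbs == 1 then cl.2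
                  else PySem.Int.toStr (Int.ofNat cl.1.natAbs) ++ "*" ++ cl.2
      if st.2 then (st.1 ++ (if cl.1 < 0 then " - " else " + ") ++ body, st.2)
      else ((if 0 < cl.1 then body else "-" ++ body), true)) ("", false)
  if st.2 then st.1 else "0"

-- ===== PRECONDITION & SPEC =====
-- A indexes vec_list[i] for every i below len(labels), so it raises IndexError iff len(labels) > len(vec).
def Pre_decode_vector (vec : List Int) (labels : List String) : Prop :=
  labels.length ≤ vec.length
instance (vec : List Int) (labels : List String) : Decidable (Pre_decode_vector vec labels) := by
  unfold Pre_decode_vector; infer_instance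
def pvWitness_decode_vector : List Int × List String := ([1, -2], ["x", "y"])

-- On inputs where some non-first emitted term has coefficient exactly 1 and a label that itself
-- starts with '-', A's string sniffing absorbs the label's minus sign (e.g. "2*x - y" for label "-y")
-- while B prints the label verbatim with a '+' separator ("2*x + -y"), which is the intended rendering.
def D_decode_vector (vec : List Int) (labels : List String) : Prop :=
  ∃ i, i < labels.length ∧ i < vec.length ∧ vec.getD i 0 = 1 ∧
    PySem.Str.startswith (labels.getD i "") "-" = true ∧ ∃ j, j < i ∧ vec.getD j 0 ≠ 0
instance (vec : List Int) (labels : List String) : Decidable (D_decode_vector vec labels) := by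
  unfold D_decode_vector; infer_instance

def Spec_decode_vector (vec : List Int) (labels : List String) (out : String) : Prop :=
  ¬ D_decode_vector vec labels → out = decode_vector_alt vec labels
instance (vec : List Int) (labels : List String) (out : String) : Decidable (Spec_decode_vector vec labels out) := by
  unfold Spec_decode_vector; infer_instance

def pvDiffWitness_decode_vector : List Int × List String := ([2, 1], ["x", "-y"])
def pvDiffWitnessOut_decode_vector : String × String := ("2*x - y", "2*x + -y")

-- ===== CLAIM (what is proved, stated in full; the proofs are below) =====
def Claim_unchanged_decode_vector : Prop := ∀ (vec : List Int) (labels : List String), Dom_decode_vector vec labels → Pre_decode_vector vec labels → Spec_decode_vector vec labels (decode_vector vec labels)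
def Claim_exact_decode_vector : Prop := ∀ (vec : List Int) (labels : List String), Dom_decode_vector vec labels → Pre_decode_vector vec labels → D_decode_vector vec labels → decode_vector vec labels ≠ decode_vector_alt vec labels
def Claim_changed_decode_vector : Prop := Dom_decode_vector (pvDiffWitness_decode_vector.1) (pvDiffWitness_decode_vector.2) ∧ Pre_decode_vector (pvDiffWitness_decode_vector.1) (pvDiffWitness_decode_vector.2) ∧ D_decode_vector (pvDiffWitness_decode_vector.1) (pvDiffWitness_decode_vector.2) ∧ decode_vector (pvDiffWitness_decode_vector.1) (pvDiffWitness_decode_vector.2) = pvDiffWitnessOut_decode_vector.1 ∧ decode_vector_alt (pvDiffWitness_decode_vector.1) (pvDiffWitness_decode_vector.2) = pvDiffWitnessOut_decode_vector.2 ∧ pvDiffWitnessOut_decode_vector.1 ≠ pvDiffWitnessOut_decode_vector.2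

-- ===== LEMMAS AND PROOFS =====

-- proof-level vocabulary: the term string A builds for one nonzero coefficient
def mkTerm (c : Int) (l : String) : String :=
  if c == 1 then l else if c == -1 then "-" ++ l else PySem.Int.toStr c ++ "*" ++ l

def termsOf (ps : List (Int × String)) : List String :=
  ps.filterMap (fun cl => if cl.1 = 0 then none else some (mkTerm cl.1 cl.2))

-- A's re-scan step and B's fused step, as named functions (same bodies as in the ports)
def stepA (result term : String) : String :=
  if PySem.Str.startswith term "-" then result ++ " - " ++ PySem.Str.slice term (some 1) none
  else result ++ " + " ++ term

def stepB (st : String × Bool) (cl : Int × String) : String × Bool :=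
  if cl.1 == 0 then st
  else
    let body := if cl.1.natAbs == 1 then cl.2
                else PySem.Int.toStr (Int.ofNat cl.1.natAbs) ++ "*" ++ cl.2
    if st.2 then (st.1 ++ (if cl.1 < 0 then " - " else " + ") ++ body, st.2)
    else ((if 0 < cl.1 then body else "-" ++ body), true)

def bodyOf (c : Int) (l : String) : String :=
  if c.natAbs == 1 then l else PySem.Int.toStr (Int.ofNat c.natAbs) ++ "*" ++ l

-- a "bad" pair is one whose A-term string lies about the sign: coefficient 1, label starting '-'
def Bad (cl : Int × String) : Prop := cl.1 = 1 ∧ PySem.Str.startswith cl.2 "-" = true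

theorem toStr_neg (n : Int) (h : n < 0) :
    PySem.Int.toStr n = "-" ++ PySem.Int.toStr (Int.ofNat n.natAbs) := by
  apply String.toList_inj.mp
  simp [PySem.Int.toStr, PySem.Int.toChars, h, String.toList_ofList]
  rw [abs_of_neg h, if_neg (by omega)]
  congr 1
  omega

theorem startswith_append_neg (s : String) :
    PySem.Str.startswith ("-" ++ s) "-" = true := by
  simp [PySem.Chars.startswith, List.isPrefixOf]

theorem slice_one_append_neg (s : String) :
    PySem.Str.slice ("-" ++ s) (some 1) none = s := by
  apply String.toList_inj.mp
  simp [PySem.List.slice_from_one]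

theorem startswith_toStr_pos (n : Int) (h : 0 < n) (s : String) :
    PySem.Str.startswith (PySem.Int.toStr n ++ s) "-" = false := by
  simp [PySem.Int.toStr, PySem.Int.toChars, h.not_gt.imp, PySem.Chars.startswith]
  obtain ⟨d, ds, hd⟩ := List.exists_cons_of_ne_nil
    (List.ne_nil_of_length_pos (Nat.length_toDigits_pos (b := 10) (n := n.toNat)))
  have hdig : d.isDigit = true :=
    Nat.isDigit_of_mem_toDigits (by omega) (by omega) (hd ▸ List.mem_cons_self ..)
  rw [hd]
  simp [List.isPrefixOf]
  intro hc
  rw [← hc] at hdig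
  simp [Char.isDigit] at hdig

-- on a good pair, A's leading-'-'-sniffing step equals B's sign-derived step
theorem step_agree (c : Int) (l : String) (acc : String) (hc : c ≠ 0) (hb : ¬ Bad (c, l)) :
    stepA acc (mkTerm c l) = acc ++ (if c < 0 then " - " else " + ") ++ bodyOf c l := by
  rcases (show c = 1 ∨ c = -1 ∨ c < -1 ∨ 1 < c by omega) with h1 | h1 | h1 | h1
  · subst h1
    have hsw : PySem.Str.startswith l "-" = false := by
      rcases Bool.eq_false_or_eq_true (PySem.Str.startswith l "-") with h | h
      · exact absurd ⟨rfl, h⟩ hb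
      · exact h
    have e1 : mkTerm 1 l = l := by simp [mkTerm]
    have e2 : bodyOf 1 l = l := by simp [bodyOf]
    rw [e1, e2, stepA, hsw, if_neg (by simp), if_neg (by norm_num)]
  · subst h1
    have e1 : mkTerm (-1) l = "-" ++ l := by simp [mkTerm]
    have e2 : bodyOf (-1) l = l := by simp [bodyOf]
    rw [e1, e2, stepA, if_pos (startswith_append_neg l), slice_one_append_neg,
        if_pos (by norm_num)]
  · have hb1 : (c == 1) = false := by simp; omega
    have hb2 : (c == -1) = false := by simp; omega
    have hb3 : (c.natAbs == 1) = false := by simp; omega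
    have e1 : mkTerm c l = "-" ++ (PySem.Int.toStr (Int.ofNat c.natAbs) ++ "*" ++ l) := by
      simp only [mkTerm, hb1, hb2, Bool.false_eq_true, if_false]
      rw [toStr_neg c (by omega)]
      simp [String.append_assoc]
    have e2 : bodyOf c l = PySem.Int.toStr (Int.ofNat c.natAbs) ++ "*" ++ l := by
      simp only [bodyOf, hb3, Bool.false_eq_true, if_false]
    rw [e1, e2, stepA, if_pos (startswith_append_neg _), slice_one_append_neg,
        if_pos (by omega)]
  · have hco : Int.ofNat c.natAbs = c := by
      simp only [Int.ofNat_eq_natCast]; omega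
    have hb1 : (c == 1) = false := by simp; omega
    have hb2 : (c == -1) = false := by simp; omega
    have hb3 : (c.natAbs == 1) = false := by simp; omega
    have e1 : mkTerm c l = PySem.Int.toStr c ++ ("*" ++ l) := by
      simp only [mkTerm, hb1, hb2, Bool.false_eq_true, if_false, String.append_assoc]
    have e2 : bodyOf c l = PySem.Int.toStr c ++ ("*" ++ l) := by
      simp only [bodyOf, hb3, Bool.false_eq_true, if_false, hco, String.append_assoc]
    rw [e1, e2, stepA, startswith_toStr_pos c (by omega), if_neg (by simp),
        if_neg (by omega)]

-- B's first emitted term is exactly A's term string (here labels may start with '-')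
theorem first_term_agree (c : Int) (l : String) (hc : c ≠ 0) :
    (if 0 < c then bodyOf c l else "-" ++ bodyOf c l) = mkTerm c l := by
  rcases (show c = 1 ∨ c = -1 ∨ c < -1 ∨ 1 < c by omega) with h1 | h1 | h1 | h1
  · subst h1; simp [mkTerm, bodyOf]
  · subst h1; simp [mkTerm, bodyOf]
  · have hb1 : (c == 1) = false := by simp; omega
    have hb2 : (c == -1) = false := by simp; omega
    have hb3 : (c.natAbs == 1) = false := by simp; omega
    rw [if_neg (by omega)]
    simp only [mkTerm, bodyOf, hb1, hb2, hb3, Bool.false_eq_true, if_false]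
    rw [toStr_neg c (by omega)]
    simp [String.append_assoc]
  · have hco : Int.ofNat c.natAbs = c := by
      simp only [Int.ofNat_eq_natCast]; omega
    have hb1 : (c == 1) = false := by simp; omega
    have hb2 : (c == -1) = false := by simp; omega
    have hb3 : (c.natAbs == 1) = false := by simp; omega
    rw [if_pos (by omega)]
    simp only [mkTerm, bodyOf, hb1, hb2, hb3, Bool.false_eq_true, if_false, hco]

theorem loopB_emitted (ps : List (Int × String)) (hgood : ∀ cl ∈ ps, ¬ Bad cl) (acc : String) :
    ps.foldl stepB (acc, true) = ((termsOf ps).foldl stepA acc, true) := by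
  induction ps generalizing acc with
  | nil => simp [termsOf]
  | cons cl rest ih =>
    obtain ⟨c, l⟩ := cl
    by_cases h0 : c = 0
    · have hs : stepB (acc, true) (c, l) = (acc, true) := by simp [stepB, h0]
      have ht : termsOf ((c, l) :: rest) = termsOf rest := by simp [termsOf, h0]
      rw [List.foldl_cons, hs, ht]
      exact ih (fun x hx => hgood x (List.mem_cons_of_mem _ hx)) acc
    · have hb := hgood (c, l) (List.mem_cons_self ..)
      have hs : stepB (acc, true) (c, l)
          = (acc ++ (if c < 0 then " - " else " + ") ++ bodyOf c l, true) := by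
        simp [stepB, h0, bodyOf]
      have ht : termsOf ((c, l) :: rest) = mkTerm c l :: termsOf rest := by
        simp [termsOf, h0]
      rw [List.foldl_cons, hs, ht, List.foldl_cons,
        ih (fun x hx => hgood x (List.mem_cons_of_mem _ hx)), step_agree c l acc h0 hb]

-- A's first loop appends exactly the term strings of the nonzero pairs
theorem foldl_A_terms (ps : List (Int × String)) (out0 : List String) :
    ps.foldl (fun (out : List String) cl =>
        if cl.1 == 0 then out
        else if cl.1 == 1 then out ++ [cl.2]
        else if cl.1 == -1 then out ++ ["-" ++ cl.2]
        else out ++ [PySem.Int.toStr cl.1 ++ "*" ++ cl.2]) out0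
      = out0 ++ termsOf ps := by
  induction ps generalizing out0 with
  | nil => simp [termsOf]
  | cons cl rest ih =>
    obtain ⟨c, l⟩ := cl
    rw [List.foldl_cons]
    by_cases h0 : c = 0
    · simp only [h0]
      rw [ih]
      simp [termsOf]
    · rcases (show c = 1 ∨ c = -1 ∨ (c ≠ 1 ∧ c ≠ -1 ∧ c ≠ 0) by omega) with h1 | h1 | ⟨ha, hb, _⟩
      · subst h1
        rw [show ((1:Int) == 0) = false from rfl, show ((1:Int) == 1) = true from rfl]
        simp only [Bool.false_eq_true, if_false, if_true]
        rw [ih]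
        simp [termsOf, mkTerm, List.append_assoc]
      · subst h1
        simp only [show ((-1:Int) == 0) = false from rfl, show ((-1:Int) == 1) = false from rfl,
          show ((-1:Int) == -1) = true from rfl, Bool.false_eq_true, if_false, if_true]
        rw [ih]
        simp [termsOf, mkTerm, List.append_assoc]
      · have e0 : (c == 0) = false := by simp [h0]
        have e1 : (c == 1) = false := by simp [ha]
        have e2 : (c == -1) = false := by simp [hb]
        simp only [e0, e1, e2, Bool.false_eq_true, if_false]
        rw [ih]
        simp [termsOf, mkTerm, h0, ha, hb, List.append_assoc]

-- A's enumerate-and-index loop is the same fold over zip vec labels, when every index is in range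
theorem foldl_enum_eq_zip (labels : List String) (s : Nat) (vec : List Int) (out0 : List String)
    (h : s + labels.length ≤ vec.length) :
    (PySem.List.enumerate labels (s : Int)).foldl (fun (out : List String) p =>
        let coeff := (PySem.List.pyGet? vec p.1).getD 0
        if coeff == 0 then out
        else if coeff == 1 then out ++ [p.2]
        else if coeff == -1 then out ++ ["-" ++ p.2]
        else out ++ [PySem.Int.toStr coeff ++ "*" ++ p.2]) out0
      = ((vec.drop s).zip labels).foldl (fun (out : List String) cl =>
        if cl.1 == 0 then out
        else if cl.1 == 1 then out ++ [cl.2]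
        else if cl.1 == -1 then out ++ ["-" ++ cl.2]
        else out ++ [PySem.Int.toStr cl.1 ++ "*" ++ cl.2]) out0 := by
  induction labels generalizing s out0 with
  | nil => simp [PySem.List.enumerate]
  | cons l rest ih =>
    have hs : s < vec.length := by simp at h; omega
    rw [PySem.List.enumerate_cons, List.foldl_cons,
        List.drop_eq_getElem_cons hs, List.zip_cons_cons, List.foldl_cons]
    have hget : (PySem.List.pyGet? vec (s : Int)).getD 0 = vec[s] := by
      rw [PySem.List.pyGet?_natCast, List.getElem?_eq_getElem hs, Option.getD_some]
    simp only [hget]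
    have : ((s : Int) + 1) = ((s + 1 : Nat) : Int) := by push_cast; ring
    rw [this, ih (s + 1) _ (by simp at h ⊢; omega)]

-- on an index-wise good pair list, build-then-rescan equals the fused pass
theorem main_agree (ps : List (Int × String))
    (hOK : ∀ i, (hi : i < ps.length) → Bad ps[i] → ∀ j, (hj : j < i) → ps[j].1 = 0) :
    (match termsOf ps with
     | [] => "0"
     | t :: rest => rest.foldl stepA t)
      = (let st := ps.foldl stepB ("", false); if st.2 then st.1 else "0") := by
  induction ps with
  | nil => simp [termsOf]
  | cons cl rest ih =>
    obtain ⟨c, l⟩ := cl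
    by_cases h0 : c = 0
    · have ht : termsOf ((c, l) :: rest) = termsOf rest := by simp [termsOf, h0]
      have hs : stepB (("", false)) (c, l) = ("", false) := by simp [stepB, h0]
      rw [ht, List.foldl_cons, hs]
      exact ih (fun i hi hbad j hj =>
        hOK (i + 1) (by simpa using Nat.succ_lt_succ hi) (by simpa using hbad) (j + 1)
          (by omega))
    · have ht : termsOf ((c, l) :: rest) = mkTerm c l :: termsOf rest := by
        simp [termsOf, h0]
      have hs : stepB (("", false)) (c, l) = (mkTerm c l, true) := by
        simp only [stepB, show (c == 0) = false by simp [h0], Bool.false_eq_true, if_false]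
        rw [show (if c.natAbs == 1 then l else PySem.Int.toStr (Int.ofNat c.natAbs) ++ "*" ++ l)
              = bodyOf c l from rfl, first_term_agree c l h0]
      have hgood : ∀ x ∈ rest, ¬ Bad x := by
        intro x hx hbad
        obtain ⟨i, hi, hxi⟩ := List.getElem_of_mem hx
        have := hOK (i + 1) (by simpa using Nat.succ_lt_succ hi) (by simpa [hxi] using hbad)
          0 (by omega)
        simp at this
        exact h0 this
      rw [ht, List.foldl_cons, hs, loopB_emitted rest hgood (mkTerm c l)]
      rfl

-- ¬ D_ gives the index-wise goodness of zip vec labels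
theorem OK_of_not_D (vec : List Int) (labels : List String) (hD : ¬ D_decode_vector vec labels) :
    ∀ i, (hi : i < (vec.zip labels).length) → Bad (vec.zip labels)[i] →
      ∀ j, (hj : j < i) → (vec.zip labels)[j].1 = 0 := by
  intro i hi hbad j hj
  by_contra hne
  apply hD
  have hiv : i < vec.length := by simp at hi; omega
  have hil : i < labels.length := by simp at hi; omega
  have hjv : j < vec.length := by omega
  refine ⟨i, hil, hiv, ?_, ?_, j, hj, ?_⟩
  · rw [List.getD_eq_getElem vec 0 hiv]
    have := hbad.1
    rwa [List.getElem_zip] at this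
  · rw [List.getD_eq_getElem labels "" hil]
    have := hbad.2
    rwa [List.getElem_zip] at this
  · rw [List.getD_eq_getElem vec 0 hjv]
    intro h
    apply hne
    rw [List.getElem_zip]
    exact h

-- the fused loop never resets the emitted flag
theorem flag_true (ps : List (Int × String)) (acc : String) :
    (ps.foldl stepB (acc, true)).2 = true := by
  induction ps generalizing acc with
  | nil => rfl
  | cons cl rest ih =>
    rw [List.foldl_cons]
    by_cases h0 : cl.1 = 0
    · rw [show stepB (acc, true) cl = (acc, true) by simp [stepB, h0]]
      exact ih acc
    · rw [show stepB (acc, true) cl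
          = (acc ++ (if cl.1 < 0 then " - " else " + ")
              ++ bodyOf cl.1 cl.2, true) by simp [stepB, h0, bodyOf]]
      exact ih _

-- after the first emission, B's string is longer than A's by one char per bad pair
theorem len_T1 (ps : List (Int × String)) (accA accB : String) :
    (ps.foldl stepB (accB, true)).1.length + accA.length
      = ((termsOf ps).foldl stepA accA).length + accB.length
        + ps.countP (fun cl => cl.1 == 1 && PySem.Str.startswith cl.2 "-") := by
  induction ps generalizing accA accB with
  | nil => simp [termsOf]; omega
  | cons cl rest ih =>
    obtain ⟨c, l⟩ := cl
    by_cases h0 : c = 0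
    · have hs : stepB (accB, true) (c, l) = (accB, true) := by simp [stepB, h0]
      have ht : termsOf ((c, l) :: rest) = termsOf rest := by simp [termsOf, h0]
      rw [List.foldl_cons, hs, ht, List.countP_cons]
      have H := ih accA accB
      simp [h0] at H ⊢
      omega
    · by_cases hbad : Bad (c, l)
      · obtain ⟨hc1, hsw⟩ := hbad
        subst hc1
        obtain ⟨t, htl⟩ : ∃ t, l.toList = '-' :: t := by
          have h' : ['-'].isPrefixOf l.toList = true := by
            simpa [PySem.Chars.startswith] using hsw
          rw [List.isPrefixOf_iff_prefix] at h'
          obtain ⟨r, hr⟩ := h'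
          exact ⟨r, hr.symm⟩
        have hl : l = "-" ++ String.ofList t := by
          apply String.toList_inj.mp
          simp [String.toList_ofList, htl]
        have ht : termsOf (((1:Int), l) :: rest) = l :: termsOf rest := by
          simp [termsOf, mkTerm]
        have hsA : stepA accA l = accA ++ " - " ++ String.ofList t := by
          rw [hl, stepA, if_pos (startswith_append_neg _), slice_one_append_neg]
        have hsB : stepB (accB, true) (1, l) = (accB ++ " + " ++ l, true) := by
          simp [stepB, bodyOf]
        rw [List.foldl_cons, hsB, ht, List.foldl_cons, hsA, List.countP_cons]
        have H := ih (accA ++ " - " ++ String.ofList t) (accB ++ " + " ++ l)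
        have eA : (" - " : String).length = 3 := rfl
        have eB : (" + " : String).length = 3 := rfl
        have eC : ("-" : String).length = 1 := rfl
        have e4 : l.length = 1 + (String.ofList t).length := by
          rw [hl, String.length_append, eC]
        have hsw' : PySem.Chars.startswith l.toList ['-'] = true := by
          simpa using hsw
        simp [String.length_append, hsw', e4, eA, eB] at H ⊢
        omega
      · have hs : stepB (accB, true) (c, l)
            = (accB ++ (if c < 0 then " - " else " + ") ++ bodyOf c l, true) := by
          simp [stepB, h0, bodyOf]
        have ht : termsOf ((c, l) :: rest) = mkTerm c l :: termsOf rest := by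
          simp [termsOf, h0]
        have hcnt : ((c, l).1 == 1 && PySem.Str.startswith (c, l).2 "-") = false := by
          rcases Bool.eq_false_or_eq_true (PySem.Str.startswith l "-") with h | h
          · have : ¬ c = 1 := fun hc => hbad ⟨hc, h⟩
            simp [this]
          · have h' : PySem.Chars.startswith l.toList ['-'] = false := by simpa using h
            simp [h']
        rw [List.foldl_cons, hs, ht, List.foldl_cons, step_agree c l accA h0 hbad,
          List.countP_cons, hcnt, if_neg (show ¬(false = true) by simp), Nat.add_zero]
        have H := ih (accA ++ (if c < 0 then " - " else " + ") ++ bodyOf c l)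
             (accB ++ (if c < 0 then " - " else " + ") ++ bodyOf c l)
        simp only [String.length_append] at H ⊢
        omega

theorem len_T2 (ps : List (Int × String))
    (hw : ∃ i, ∃ hi : i < ps.length, Bad ps[i] ∧ ∃ j, ∃ hj : j < i, ps[j].1 ≠ 0) :
    (match termsOf ps with
     | [] => "0"
     | t :: rest => rest.foldl stepA t).length
      < (let st := ps.foldl stepB ("", false); if st.2 then st.1 else "0").length := by
  induction ps with
  | nil => obtain ⟨i, hi, _⟩ := hw; simp at hi
  | cons cl rest ih =>
    obtain ⟨c, l⟩ := cl
    obtain ⟨i, hi, hbad, j, hj, hnz⟩ := hw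
    by_cases h0 : c = 0
    · rcases j with _ | m
      · exact absurd h0 (by simpa using hnz)
      rcases i with _ | k
      · omega
      have ht : termsOf ((c, l) :: rest) = termsOf rest := by simp [termsOf, h0]
      have hs : stepB (("", false)) (c, l) = ("", false) := by simp [stepB, h0]
      rw [ht, List.foldl_cons, hs]
      exact ih ⟨k, by simpa using Nat.lt_of_succ_lt_succ hi, by simpa using hbad,
        m, by omega, by simpa using hnz⟩
    · rcases i with _ | k
      · omega
      have ht : termsOf ((c, l) :: rest) = mkTerm c l :: termsOf rest := by
        simp [termsOf, h0]
      have hs : stepB (("", false)) (c, l) = (mkTerm c l, true) := by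
        simp only [stepB, show (c == 0) = false by simp [h0], Bool.false_eq_true, if_false]
        rw [show (if c.natAbs == 1 then l else PySem.Int.toStr (Int.ofNat c.natAbs) ++ "*" ++ l)
              = bodyOf c l from rfl, first_term_agree c l h0]
      rw [ht, List.foldl_cons, hs]
      have hflag := flag_true rest (mkTerm c l)
      have hT1 := len_T1 rest (mkTerm c l) (mkTerm c l)
      have hk : k < rest.length := by simp at hi; omega
      have hcnt : 0 < rest.countP (fun cl => cl.1 == 1 && PySem.Str.startswith cl.2 "-") := by
        rw [List.countP_pos_iff]
        refine ⟨rest[k]'hk, List.getElem_mem _, ?_⟩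
        have hbd : Bad (rest[k]'hk) := by simpa using hbad
        have h2 : PySem.Chars.startswith (rest[k]'hk).2.toList ['-'] = true := by
          simpa using hbd.2
        simp [hbd.1, h2]
      show (List.foldl stepA (mkTerm c l) (termsOf rest)).length
          < (let st := List.foldl stepB (mkTerm c l, true) rest; if st.2 then st.1 else "0").length
      rw [show (let st := List.foldl stepB (mkTerm c l, true) rest;
            if st.2 then st.1 else "0") = (List.foldl stepB (mkTerm c l, true) rest).1 by
          simp [hflag]]
      omega

-- under Pre_, A's output is the build-then-rescan of the zipped pair list
theorem A_norm (vec : List Int) (labels : List String) (hpre : labels.length ≤ vec.length) :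
    decode_vector vec labels =
      (match termsOf (vec.zip labels) with
       | [] => "0"
       | t :: rest => rest.foldl stepA t) := by
  unfold decode_vector
  have h0 := foldl_enum_eq_zip labels 0 vec [] (by omega)
  simp only [Nat.cast_zero, List.drop_zero] at h0
  rw [h0, foldl_A_terms]
  rfl

-- ===== VERDICT (by name: the statement is the Claim_ definition above) =====
theorem decode_vector_spec : Claim_unchanged_decode_vector := by
  intro vec labels hdom hpre hD
  show decode_vector vec labels = decode_vector_alt vec labels
  unfold Pre_decode_vector at hpre
  rw [A_norm vec labels hpre, main_agree _ (OK_of_not_D vec labels hD)]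
  rfl

theorem decode_vector_tight : Claim_exact_decode_vector := by
  intro vec labels hdom hpre hD heq
  unfold Pre_decode_vector at hpre
  obtain ⟨i, hil, hiv, h1, hsw, j, hji, hnz⟩ := hD
  have hw : ∃ k, ∃ hk : k < (vec.zip labels).length, Bad (vec.zip labels)[k] ∧
      ∃ m, ∃ hm : m < k, (vec.zip labels)[m].1 ≠ 0 := by
    refine ⟨i, by simp; omega, ⟨?_, ?_⟩, j, hji, ?_⟩
    · rw [List.getElem_zip]
      rwa [List.getD_eq_getElem vec 0 hiv] at h1
    · rw [List.getElem_zip]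
      rwa [List.getD_eq_getElem labels "" hil] at hsw
    · rw [List.getElem_zip]
      rwa [List.getD_eq_getElem vec 0 (by omega)] at hnz
  have hlt := len_T2 (vec.zip labels) hw
  rw [← A_norm vec labels hpre, heq] at hlt
  exact absurd rfl (Nat.ne_of_lt hlt)

theorem decode_vector_changed : Claim_changed_decode_vector := by
  unfold Claim_changed_decode_vector; decide
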